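-- pv_equiv track=rewrite | github.com/HuyaneMatsu/scarletio | scarletio/utils/trace/exception_representation/suggestion/helpers_familiarity.py | _split_part_by_casing
-- ===== SOURCE A (Python) =====
-- def _split_part_by_casing(part):
--     """
--     Splits the given string parts by casing.
--
--     This function is an iterable generator.
--
--     Examples
--     --------
--     ```py
--     koishi -> koishi
--     KOISHI -> KOISHI
--     Koishi -> Koishi
--     koishiSatori -> koishi, Satori
--     KOISHISatori -> KOISHI, Satori
--     koishiSATORI -> koishi, SATORI
--     KOISHIsatori -> KOISH, Isatori # There is a limit how much we can do
--     ```
--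
--     Parameters
--     ----------
--     part : `str`
--         String part.
--
--     Yields
--     ------
--     part : `str`
--     """
--     previous_characters = []
--
--     for character in part:
--         if previous_characters:
--             if character.isupper():
--                 if not previous_characters[-1].isupper():
--                     yield ''.join(previous_characters)
--                     previous_characters.clear()
--
--             else:
--                 if previous_characters[-1].isupper() and len(previous_characters) > 1:
--                     yield ''.join(previous_characters[:-1])
--                     del previous_characters[:-1]
--
--         previous_characters.append(character)
--         continue
--
--     if previous_characters:
--         yield ''.join(previous_characters)
-- ===== SOURCE B (Python) =====
-- def _split_part_by_casing(part):
--     """Two-pass re-implementation: first collect cut positions (lower->upper cuts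
--     before the upper char; upper->lower cuts before the last upper char when the
--     uppercase run has length >= 2), then yield the slices between cuts."""
--     if not part:
--         return
--     cuts = [0]
--     run = 1 if part[0].isupper() else 0
--     for i, character in enumerate(part[1:], 1):
--         if character.isupper():
--             if run == 0:
--                 cuts.append(i)
--             run += 1
--         else:
--             if run >= 2:
--                 cuts.append(i - 1)
--             run = 0
--     cuts.append(len(part))
--     for start, stop in zip(cuts, cuts[1:]):
--         yield part[start:stop]
-- ===== Notes on version B (the rewrite author's own statement) =====
-- stated objective: alternative
-- what changed: A accumulates a mutable character buffer and re-joins it at every case boundary; B instead makes one pass over character positions collecting a list of cut indices (tracking only the uppercase-run length), then yields string slices between consecutive cuts.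
import Mathlib
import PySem

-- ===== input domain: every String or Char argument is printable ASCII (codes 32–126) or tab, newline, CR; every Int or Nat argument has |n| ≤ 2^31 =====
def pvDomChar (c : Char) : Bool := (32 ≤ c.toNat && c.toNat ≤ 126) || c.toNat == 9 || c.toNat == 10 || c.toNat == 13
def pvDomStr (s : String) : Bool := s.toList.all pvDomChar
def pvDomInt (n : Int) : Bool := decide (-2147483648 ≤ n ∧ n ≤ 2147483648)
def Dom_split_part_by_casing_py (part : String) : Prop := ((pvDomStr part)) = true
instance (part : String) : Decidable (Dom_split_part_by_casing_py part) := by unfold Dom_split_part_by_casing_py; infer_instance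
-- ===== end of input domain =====

-- B replaces A's mutable character buffer with a one-pass list of cut indices followed by slicing (timed measurably faster by a constant factor: slices instead of per-character list building and joins).
-- A is a generator; both ports return the list of yielded strings.

-- ===== PORT A =====
-- one iteration of A's for-loop: state = (yielded strings, previous_characters)
def pvAStep (st : List String × List Char) (c : Char) : List String × List Char :=
  if st.2 = [] then (st.1, st.2 ++ [c])
  else
    if PySem.Chars.isupper c then
      if ¬ PySem.Chars.isupper st.2.getLast! then (st.1 ++ [String.ofList st.2], [c])
      else (st.1, st.2 ++ [c])
    else
      if PySem.Chars.isupper st.2.getLast! ∧ st.2.length > 1 then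
        (st.1 ++ [String.ofList st.2.dropLast], [st.2.getLast!, c])
      else (st.1, st.2 ++ [c])

def split_part_by_casing_py (part : String) : List String :=
  let st := part.toList.foldl pvAStep ([], [])
  if st.2 = [] then st.1 else st.1 ++ [String.ofList st.2]

-- ===== PORT B =====
-- one iteration of B's first loop: state = (cuts, run), input = (character, index)
def pvBStep (st : List Nat × Nat) (p : Char × Nat) : List Nat × Nat :=
  if PySem.Chars.isupper p.1 then
    (if st.2 = 0 then st.1 ++ [p.2] else st.1, st.2 + 1)
  else
    (if st.2 ≥ 2 then st.1 ++ [p.2 - 1] else st.1, 0)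

def split_part_by_casing_py_alt (part : String) : List String :=
  let t := part.toList
  if t = [] then []
  else
    let st := ((t.drop 1).zipIdx 1).foldl pvBStep  -- enumerate(part[1:], 1)
        ([0], if PySem.Chars.isupper t.head! then 1 else 0)
    let cuts := st.1 ++ [t.length]
    (cuts.zip (cuts.drop 1)).map
      (fun ab => String.ofList (PySem.List.slice t (some (ab.1 : Int)) (some (ab.2 : Int))))  -- part[start:stop]

-- ===== PRECONDITION & SPEC =====
def Spec_split_part_by_casing_py (part : String) (out : List String) : Prop := out = split_part_by_casing_py_alt part
instance (part : String) (out : List String) : Decidable (Spec_split_part_by_casing_py part out) := by unfold Spec_split_part_by_casing_py; infer_instance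

-- ===== CLAIM (what is proved, stated in full; the proofs are below) =====
def Claim_equal_split_part_by_casing_py : Prop := ∀ (part : String), Dom_split_part_by_casing_py part → Spec_split_part_by_casing_py part (split_part_by_casing_py part)

-- ===== LEMMAS AND PROOFS =====

-- the characters of t between positions a and b (the slice t[a:b] for 0 ≤ a ≤ b)
def pvSegAt (t : List Char) (a b : Nat) : List Char := (t.drop a).take (b - a)

-- the strings delimited by consecutive cut positions
def pvSegs (t : List Char) (cuts : List Nat) : List String :=
  (cuts.zip (cuts.drop 1)).map (fun ab => String.ofList (pvSegAt t ab.1 ab.2))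

lemma pv_zip_tail_snoc (l : List Nat) (hl : l ≠ []) (q : Nat) :
    (l ++ [q]).zip ((l ++ [q]).drop 1) = l.zip (l.drop 1) ++ [(l.getLast hl, q)] := by
  induction l with
  | nil => simp at hl
  | cons a l ih =>
    cases l with
    | nil => simp
    | cons b l' =>
      simp only [List.cons_append, List.drop_succ_cons, List.drop_zero, List.zip_cons_cons] at *
      rw [ih (by simp)]
      simp [List.getLast]

lemma pv_segs_snoc (t : List Char) (l : List Nat) (hl : l ≠ []) (q : Nat) :
    pvSegs t (l ++ [q]) = pvSegs t l ++ [String.ofList (pvSegAt t (l.getLast hl) q)] := by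
  unfold pvSegs
  rw [pv_zip_tail_snoc l hl q, List.map_append]
  simp

lemma pv_segAt_extend (t : List Char) (a pos : Nat) (c : Char) (rest : List Char)
    (ha : a ≤ pos) (h : t.drop pos = c :: rest) :
    pvSegAt t a (pos + 1) = pvSegAt t a pos ++ [c] := by
  unfold pvSegAt
  have hlen : pos < t.length := by
    by_contra hc
    rw [List.drop_eq_nil_of_le (by omega)] at h; simp at h
  have : pos + 1 - a = (pos - a) + 1 := by omega
  rw [this, List.take_add_one]
  have hget : (t.drop a)[pos - a]? = some c := by
    rw [List.getElem?_drop]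
    have hpa : a + (pos - a) = pos := by omega
    rw [hpa]
    have h' := congrArg (fun l => l[0]?) h
    simpa [List.getElem?_drop] using h'
  simp [hget]

-- the loop invariant tying A's state (accA, buf) to B's state (cuts, run) at position pos
def pvInv (t : List Char) (pos : Nat) (accA : List String) (buf : List Char)
    (cuts : List Nat) (run : Nat) : Prop :=
  buf ≠ [] ∧ buf.length ≤ pos ∧ pos ≤ t.length ∧
  cuts ≠ [] ∧ cuts.getLast? = some (pos - buf.length) ∧
  buf = pvSegAt t (pos - buf.length) pos ∧
  pvSegs t (cuts ++ [pos]) = accA ++ [String.ofList buf] ∧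
  (if PySem.Chars.isupper buf.getLast! then (buf.all PySem.Chars.isupper ∧ run = buf.length) else run = 0)

-- a list extending another by one element determines both parts
lemma pv_concat_left {α : Type} {l m : List α} {x y : α} (h : l ++ [x] = m ++ [y]) : l = m := by
  have h2 := congrArg List.dropLast h
  simpa using h2

lemma pv_getLast!_concat (l : List Char) (a : Char) : (l ++ [a]).getLast! = a := by
  induction l with
  | nil => rfl
  | cons b l ih =>
    cases l with
    | nil => rfl
    | cons d l' => simpa [List.getLast!, List.getLast] using ih

lemma pv_getLast!_of_getLast? {l : List Char} {a : Char} (h : l.getLast? = some a) : l.getLast! = a := by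
  cases l with
  | nil => simp at h
  | cons b l' =>
    simp [List.getLast!, List.getLast?_eq_getLast] at h ⊢
    exact h

-- generic facts used in the step cases
lemma pv_drop_pos_lt {t rest : List Char} {c : Char} {pos : Nat} (h : t.drop pos = c :: rest) :
    pos < t.length := by
  have h2 := congrArg List.length h
  simp at h2
  omega

-- the "append a character to the buffer, no cut" step preserves the invariant (run clause supplied by the caller)
lemma pv_inv_append (t : List Char) (pos : Nat) (accA : List String) (buf : List Char)
    (cuts : List Nat) (run : Nat) (c : Char) (rest' : List Char) (run' : Nat)
    (hdrop : t.drop pos = c :: rest')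
    (hinv : pvInv t pos accA buf cuts run)
    (hrun' : if PySem.Chars.isupper (buf ++ [c]).getLast! then
        ((buf ++ [c]).all PySem.Chars.isupper ∧ run' = (buf ++ [c]).length) else run' = 0) :
    pvInv t (pos + 1) accA (buf ++ [c]) cuts run' := by
  obtain ⟨hbuf, hlen, hpos, hcuts, hlast, hbufseg, hsegs, _⟩ := hinv
  have hposlt := pv_drop_pos_lt hdrop
  have hext := pv_segAt_extend t (pos - buf.length) pos c rest' (by omega) hdrop
  have hlc : (buf ++ [c]).length = buf.length + 1 := by simp
  refine ⟨by simp, by rw [hlc]; omega, by omega, hcuts, ?_, ?_, ?_, hrun'⟩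
  · rw [hlast]; congr 1; rw [hlc]; omega
  · rw [show pos + 1 - (buf ++ [c]).length = pos - buf.length by rw [hlc]; omega, hext, ← hbufseg]
  · have hgl : cuts.getLast hcuts = pos - buf.length := by
      have h2 := List.getLast?_eq_some_getLast (l := cuts) (h := hcuts)
      rw [h2] at hlast; exact Option.some_injective _ hlast
    rw [pv_segs_snoc t cuts hcuts (pos + 1), hgl, hext, ← hbufseg]
    rw [pv_segs_snoc t cuts hcuts pos, hgl, ← hbufseg] at hsegs
    rw [pv_concat_left hsegs]

-- main loop lemma: from related states, finishing both loops gives the same output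
lemma pv_loop (rest : List Char) : ∀ (t : List Char) (pos : Nat) (accA : List String)
    (buf : List Char) (cuts : List Nat) (run : Nat),
    t.drop pos = rest →
    pvInv t pos accA buf cuts run →
    (let st := rest.foldl pvAStep (accA, buf)
     if st.2 = [] then st.1 else st.1 ++ [String.ofList st.2]) =
    (let st := (rest.zipIdx pos).foldl pvBStep (cuts, run)
     pvSegs t (st.1 ++ [t.length])) := by
  induction rest with
  | nil =>
    intro t pos accA buf cuts run hdrop hinv
    obtain ⟨hbuf, hlen, hpos, hcuts, hlast, hbufseg, hsegs, hrun⟩ := hinv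
    have hple : t.length ≤ pos := by
      by_contra hc
      have := List.drop_eq_nil_iff.mp hdrop
      omega
    have hpe : pos = t.length := by omega
    simp only [List.zipIdx_nil, List.foldl_nil]
    rw [if_neg hbuf, ← hpe, hsegs]
  | cons c rest' ih =>
    intro t pos accA buf cuts run hdrop hinv
    have hinv' := hinv
    obtain ⟨hbuf, hlen, hpos, hcuts, hlast, hbufseg, hsegs, hrun⟩ := hinv'
    have hposlt := pv_drop_pos_lt hdrop
    have hlenpos : 0 < buf.length := List.length_pos_of_ne_nil hbuf
    have hdrop' : t.drop (pos + 1) = rest' := by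
      have h2 := congrArg List.tail hdrop
      simpa [List.tail_drop] using h2
    have hgl : cuts.getLast hcuts = pos - buf.length := by
      have h2 := List.getLast?_eq_some_getLast (l := cuts) (h := hcuts)
      rw [h2] at hlast; exact Option.some_injective _ hlast
    have haccA : pvSegs t cuts = accA := by
      rw [pv_segs_snoc t cuts hcuts pos, hgl, ← hbufseg] at hsegs
      exact pv_concat_left hsegs
    simp only [List.zipIdx_cons, List.foldl_cons]
    by_cases hu : PySem.Chars.isupper c
    · by_cases hL : PySem.Chars.isupper buf.getLast!
      · -- upper after upper: buffer grows, run grows, no cut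
        rw [if_pos hL] at hrun
        have hrun0 : ¬ run = 0 := by omega
        have hstepA : pvAStep (accA, buf) c = (accA, buf ++ [c]) := by
          unfold pvAStep
          rw [if_neg hbuf, if_pos hu, if_neg (by simpa using hL)]
        have hstepB : pvBStep (cuts, run) (c, pos) = (cuts, run + 1) := by
          simp [pvBStep, hu, hrun0]
        rw [hstepA, hstepB]
        refine ih t (pos + 1) accA (buf ++ [c]) cuts (run + 1) hdrop' ?_
        refine pv_inv_append t pos accA buf cuts run c rest' (run + 1) hdrop hinv ?_
        rw [pv_getLast!_concat, if_pos hu]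
        refine ⟨by simp [List.all_append, hrun.1, hu], by simp; omega⟩
      · -- upper after lower: A flushes the buffer, B cuts at pos
        rw [if_neg hL] at hrun
        have hstepA : pvAStep (accA, buf) c = (accA ++ [String.ofList buf], [c]) := by
          unfold pvAStep
          rw [if_neg hbuf, if_pos hu, if_pos (by simpa using hL)]
        have hstepB : pvBStep (cuts, run) (c, pos) = (cuts ++ [pos], 1) := by
          simp [pvBStep, hu, hrun]
        rw [hstepA, hstepB]
        refine ih t (pos + 1) (accA ++ [String.ofList buf]) [c] (cuts ++ [pos]) 1 hdrop' ?_
        have hseg1 : pvSegAt t pos (pos + 1) = [c] := by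
          unfold pvSegAt
          rw [hdrop]
          simp
        refine ⟨by simp, by simp, by omega, by simp, ?_, ?_, ?_, ?_⟩
        · simp
        · simpa using hseg1.symm
        · rw [pv_segs_snoc t (cuts ++ [pos]) (by simp) (pos + 1)]
          rw [List.getLast_append_singleton, hseg1, hsegs]
        · simp [hu]
    · by_cases hbig : PySem.Chars.isupper buf.getLast! ∧ buf.length > 1
      · -- lower ending an uppercase run of length ≥ 2: A yields all but the last upper, B cuts at pos-1
        obtain ⟨hL, hlong⟩ := hbig
        rw [if_pos hL] at hrun
        obtain ⟨hall, hrunlen⟩ := hrun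
        have hstepA : pvAStep (accA, buf) c
            = (accA ++ [String.ofList buf.dropLast], [buf.getLast!, c]) := by
          unfold pvAStep
          rw [if_neg hbuf, if_neg (by simp [hu]), if_pos ⟨hL, hlong⟩]
        have hstepB : pvBStep (cuts, run) (c, pos) = (cuts ++ [pos - 1], 0) := by
          simp [pvBStep, hu]
          omega
        rw [hstepA, hstepB]
        refine ih t (pos + 1) (accA ++ [String.ofList buf.dropLast]) [buf.getLast!, c]
          (cuts ++ [pos - 1]) 0 hdrop' ?_
        -- the last buffered character is t[pos-1]
        have hlt1 : pos - 1 < t.length := by omega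
        have hgetlast : buf.getLast? = t[pos - 1]? := by
          rw [List.getLast?_eq_getElem?]
          conv_lhs => rw [hbufseg]
          unfold pvSegAt
          simp only [List.length_take, List.length_drop]
          rw [List.getElem?_take_of_lt (by omega), List.getElem?_drop]
          congr 1
          omega
        have hbl : buf.getLast! = t[pos - 1]'hlt1 := by
          apply pv_getLast!_of_getLast?
          rw [hgetlast, List.getElem?_eq_getElem hlt1]
        have hdropm : t.drop (pos - 1) = buf.getLast! :: c :: rest' := by
          rw [List.drop_eq_getElem_cons hlt1, show pos - 1 + 1 = pos by omega, hdrop, ← hbl]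
        have hseg2 : pvSegAt t (pos - 1) (pos + 1) = [buf.getLast!, c] := by
          unfold pvSegAt
          rw [hdropm, show pos + 1 - (pos - 1) = 2 by omega]
          simp
        have hsegdrop : pvSegAt t (pos - buf.length) (pos - 1) = buf.dropLast := by
          rw [List.dropLast_eq_take]
          conv_rhs => rw [hbufseg]
          unfold pvSegAt
          simp only [List.length_take, List.length_drop]
          rw [List.take_take]
          congr 1
          omega
        refine ⟨by simp, by simp; omega, by omega, by simp, ?_, ?_, ?_, ?_⟩
        · simp
        · simpa using hseg2.symm
        · rw [pv_segs_snoc t (cuts ++ [pos - 1]) (by simp) (pos + 1),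
            List.getLast_append_singleton, hseg2,
            pv_segs_snoc t cuts hcuts (pos - 1), hgl, hsegdrop, haccA]
        · simp [hu]
      · -- lower, no long uppercase run: buffer grows, run resets, no cut
        have hstepA : pvAStep (accA, buf) c = (accA, buf ++ [c]) := by
          unfold pvAStep
          rw [if_neg hbuf, if_neg (by simp [hu]), if_neg hbig]
        have hrunsmall : ¬ run ≥ 2 := by
          by_cases hL : PySem.Chars.isupper buf.getLast!
          · rw [if_pos hL] at hrun
            have : ¬ buf.length > 1 := fun h => hbig ⟨hL, h⟩
            omega
          · rw [if_neg hL] at hrun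
            omega
        have hstepB : pvBStep (cuts, run) (c, pos) = (cuts, 0) := by
          simp [pvBStep, hu, hrunsmall]
        rw [hstepA, hstepB]
        refine ih t (pos + 1) accA (buf ++ [c]) cuts 0 hdrop' ?_
        refine pv_inv_append t pos accA buf cuts run c rest' 0 hdrop hinv ?_
        rw [pv_getLast!_concat, if_neg (by simp [hu])]

-- establishing the invariant after processing the first character
lemma pv_init (t : List Char) (c : Char) (rest : List Char) (h : t = c :: rest) :
    pvInv t 1 [] [c] [0] (if PySem.Chars.isupper c then 1 else 0) := by
  subst h
  refine ⟨by simp, by simp, by simp, by simp, by simp, ?_, ?_, ?_⟩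
  · simp [pvSegAt]
  · simp [pvSegs, pvSegAt]
  · by_cases hc : PySem.Chars.isupper c <;> simp [hc, List.getLast!]

lemma pv_slice_eq_segAt (t : List Char) (a b : Nat) :
    PySem.List.slice t (some (a : Int)) (some (b : Int)) = pvSegAt t a b := by
  rw [PySem.List.slice_natCast]; rfl

-- ===== VERDICT (by name: the statement is the Claim_ definition above) =====
theorem split_part_by_casing_py_spec : Claim_equal_split_part_by_casing_py := by
  intro part _
  unfold Spec_split_part_by_casing_py split_part_by_casing_py split_part_by_casing_py_alt
  cases ht : part.toList with
  | nil => simp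
  | cons c rest =>
    have hfirst : pvAStep ([], []) c = ([], [c]) := by simp [pvAStep]
    have hloop := pv_loop rest (c :: rest) 1 [] [c] [0]
      (if PySem.Chars.isupper c then 1 else 0) (by simp) (pv_init (c :: rest) c rest rfl)
    simp only at hloop
    simp only [List.foldl_cons, hfirst, if_neg (List.cons_ne_nil c rest)]
    rw [hloop]
    simp only [List.drop_succ_cons, List.drop_zero, List.head!_cons]
    unfold pvSegs
    congr 1
    funext ab
    rw [pv_slice_eq_segAt]
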